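-- pv_equiv track=rewrite | github.com/marioyeahs/armario | armario/mercado/views.py | fam_member
-- ===== SOURCE A (Python) =====
-- def fam_member(type: str,dept: str):
--     sizes = []
--     if dept == 'SH':
--         if type == 'M':
--             for i in range(25,32):
--                 sizes+=[f'{i} cm']
--         elif type == 'W':
--             for i in range (23,27):
--                 sizes+=[f'{i} cm']
--         elif type == 'GS':
--             for i in range (21,25):
--                 sizes+=[f'{i} cm']
--         elif type == 'PS':
--             for i in range (15,21):
--                 sizes+=[f'{i} cm']
--     elif dept == 'CL':
--         sizes=['XS','S','M','L','XL','XXL']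
--
--     return sizes
-- ===== SOURCE B (Python) =====
-- # Denormalized catalog of every (dept, type, size) row; type None means "any type".
-- _CATALOG = (
--     [('SH', 'M', f'{i} cm') for i in range(25, 32)]
--     + [('SH', 'W', f'{i} cm') for i in range(23, 27)]
--     + [('SH', 'GS', f'{i} cm') for i in range(21, 25)]
--     + [('SH', 'PS', f'{i} cm') for i in range(15, 21)]
--     + [('CL', None, s) for s in ('XS', 'S', 'M', 'L', 'XL', 'XXL')]
-- )
--
-- def fam_member(type: str, dept: str):
--     return [s for d, t, s in _CATALOG if d == dept and (t is None or t == type)]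
-- ===== Notes on version B (the rewrite author's own statement) =====
-- stated objective: alternative
-- what changed: Replaces the nested if/elif dispatch with per-branch loops by a single filter pass over one denormalized catalog list of (dept, type, size) rows (type None matching any type), so there is no branching on dept/type at all.
import Mathlib
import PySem

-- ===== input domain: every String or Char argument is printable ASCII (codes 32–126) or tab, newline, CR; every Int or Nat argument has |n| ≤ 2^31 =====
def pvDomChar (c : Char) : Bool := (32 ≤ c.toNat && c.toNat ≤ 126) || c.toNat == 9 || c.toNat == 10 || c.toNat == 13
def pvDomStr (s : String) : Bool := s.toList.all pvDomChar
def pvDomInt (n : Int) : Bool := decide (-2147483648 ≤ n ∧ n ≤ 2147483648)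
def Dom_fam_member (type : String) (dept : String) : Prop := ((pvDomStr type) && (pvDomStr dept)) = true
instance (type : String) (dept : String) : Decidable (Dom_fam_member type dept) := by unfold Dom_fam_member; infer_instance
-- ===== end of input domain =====

-- B replaces A's nested if/elif dispatch with per-branch loops by one filter pass over a
-- denormalized catalog of (dept, type, size) rows (objective: alternative data structure).

-- ===== PORT A =====
def fam_member (type : String) (dept : String) : List String :=
  let sizes : List String := []
  if dept == "SH" then
    if type == "M" then
      (PySem.List.pyRange 25 32 1).foldl (fun s i => s ++ [PySem.Int.toStr i ++ " cm"]) sizes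
    else if type == "W" then
      (PySem.List.pyRange 23 27 1).foldl (fun s i => s ++ [PySem.Int.toStr i ++ " cm"]) sizes
    else if type == "GS" then
      (PySem.List.pyRange 21 25 1).foldl (fun s i => s ++ [PySem.Int.toStr i ++ " cm"]) sizes
    else if type == "PS" then
      (PySem.List.pyRange 15 21 1).foldl (fun s i => s ++ [PySem.Int.toStr i ++ " cm"]) sizes
    else sizes
  else if dept == "CL" then
    ["XS", "S", "M", "L", "XL", "XXL"]
  else sizes

-- ===== PORT B =====
-- the module-level catalog, built exactly as in Source B
def famCatalog : List (String × Option String × String) :=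
  (PySem.List.pyRange 25 32 1).map (fun i => ("SH", some "M", PySem.Int.toStr i ++ " cm"))
  ++ (PySem.List.pyRange 23 27 1).map (fun i => ("SH", some "W", PySem.Int.toStr i ++ " cm"))
  ++ (PySem.List.pyRange 21 25 1).map (fun i => ("SH", some "GS", PySem.Int.toStr i ++ " cm"))
  ++ (PySem.List.pyRange 15 21 1).map (fun i => ("SH", some "PS", PySem.Int.toStr i ++ " cm"))
  ++ (["XS", "S", "M", "L", "XL", "XXL"].map (fun s => ("CL", (none : Option String), s)))

def fam_member_alt (type : String) (dept : String) : List String :=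
  (famCatalog.filter
      (fun r => r.1 == dept && (r.2.1.isNone || r.2.1 == some type))).map
    (fun r => r.2.2)

-- ===== PRECONDITION & SPEC =====
def Spec_fam_member (type : String) (dept : String) (out : List String) : Prop := out = fam_member_alt type dept
instance (type : String) (dept : String) (out : List String) : Decidable (Spec_fam_member type dept out) := by unfold Spec_fam_member; infer_instance

-- ===== CLAIM (what is proved, stated in full; the proofs are below) =====
def Claim_equal_fam_member : Prop := ∀ (type : String) (dept : String), Dom_fam_member type dept → Spec_fam_member type dept (fam_member type dept)

-- ===== LEMMAS AND PROOFS =====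

-- ===== VERDICT (by name: the statement is the Claim_ definition above) =====
theorem fam_member_spec : Claim_equal_fam_member := by
  intro type dept _
  unfold Spec_fam_member fam_member fam_member_alt
  by_cases hd : dept = "SH"
  · subst hd
    by_cases h1 : type = "M"
    · subst h1; decide
    by_cases h2 : type = "W"
    · subst h2; decide
    by_cases h3 : type = "GS"
    · subst h3; decide
    by_cases h4 : type = "PS"
    · subst h4; decide
    have g1 : ("M" == type) = false := beq_eq_false_iff_ne.mpr (fun h => h1 h.symm)
    have g2 : ("W" == type) = false := beq_eq_false_iff_ne.mpr (fun h => h2 h.symm)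
    have g3 : ("GS" == type) = false := beq_eq_false_iff_ne.mpr (fun h => h3 h.symm)
    have g4 : ("PS" == type) = false := beq_eq_false_iff_ne.mpr (fun h => h4 h.symm)
    have k1 : (type == "M") = false := beq_eq_false_iff_ne.mpr h1
    have k2 : (type == "W") = false := beq_eq_false_iff_ne.mpr h2
    have k3 : (type == "GS") = false := beq_eq_false_iff_ne.mpr h3
    have k4 : (type == "PS") = false := beq_eq_false_iff_ne.mpr h4
    simp [famCatalog, PySem.List.pyRange, List.filter, k1, k2, k3, k4]
    exact ⟨fun _ _ h => h1 h.symm, fun _ _ h => h2 h.symm, fun _ _ h => h3 h.symm,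
      fun _ _ h => h4 h.symm⟩
  · have gd : (dept == "SH") = false := beq_eq_false_iff_ne.mpr hd
    by_cases hc : dept = "CL"
    · subst hc; simp [famCatalog, PySem.List.pyRange, List.range_succ]
    · have gc : (dept == "CL") = false := beq_eq_false_iff_ne.mpr hc
      have gc2 : ("CL" == dept) = false := beq_eq_false_iff_ne.mpr (fun h => hc h.symm)
      simp [famCatalog, PySem.List.pyRange, List.filter, gd, gc, gc2]
      exact ⟨fun _ _ h _ => hd h.symm, fun _ _ h _ => hd h.symm, fun _ _ h _ => hd h.symm,
        fun _ _ h _ => hd h.symm⟩
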